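-- pv_equiv track=rewrite | github.com/marvin-tas/advent-of-code | solutions/2016/04/security_through_obscurity.py | decrypt_room_name
-- ===== SOURCE A (Python) =====
-- def convert_lower_case_letter_to_alphabet_number(character):
--     return ord(character) - 97
--
-- def convert_alphabet_number_to_lower_case_letter(number):
--     return chr(ord('`')+number+1)
--
-- def shift_character(c, shift):
--     original_alphabet_number = convert_lower_case_letter_to_alphabet_number(c)
--     shifted_alphabet_number = (original_alphabet_number + shift) % 26
--     return convert_alphabet_number_to_lower_case_letter(shifted_alphabet_number)
--
-- def decrypt_room_name(room_name, sector_id):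
--     words = room_name.split("-")
--     new_words = []
--     for word in words:
--         new_word = ""
--         for letter in word:
--             new_word += shift_character(letter, sector_id)
--         new_words.append(new_word)
--     return " ".join(new_words)
-- ===== SOURCE B (Python) =====
-- def decrypt_room_name(room_name, sector_id):
--     s = sector_id % 26
--     return "".join(" " if c == "-" else chr(97 + (ord(c) - 97 + s) % 26)
--                    for c in room_name)
-- ===== Notes on version B (the rewrite author's own statement) =====
-- stated objective: simpler
-- what changed: Replaced A's split-on-dash / nested word loop with string concatenation / space-join pipeline by a single pass that reduces the shift once (sector_id % 26) and maps each character directly ('-' to space, others Caesar-shifted), joined once.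
import Mathlib
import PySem

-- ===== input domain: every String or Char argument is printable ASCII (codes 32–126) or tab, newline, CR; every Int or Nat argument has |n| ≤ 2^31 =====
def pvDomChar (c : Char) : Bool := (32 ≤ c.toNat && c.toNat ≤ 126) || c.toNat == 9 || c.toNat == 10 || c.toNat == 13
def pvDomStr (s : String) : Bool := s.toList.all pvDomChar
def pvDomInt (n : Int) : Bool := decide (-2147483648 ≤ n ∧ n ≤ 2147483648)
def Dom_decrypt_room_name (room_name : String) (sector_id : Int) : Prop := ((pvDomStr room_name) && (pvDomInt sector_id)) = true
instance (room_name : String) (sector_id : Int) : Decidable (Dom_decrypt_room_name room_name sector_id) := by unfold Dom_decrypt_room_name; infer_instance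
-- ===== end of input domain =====

-- B replaces A's split-on-dash / nested word loop / space-join pipeline by one pass
-- mapping each character directly ('-' → ' ', others Caesar-shifted by sector_id % 26): simpler.

-- ===== PORT A =====
def convert_lower_case_letter_to_alphabet_number (character : Char) : Int :=
  (character.toNat : Int) - 97

-- chr(ord('`') + number + 1); exact here since every call passes number = _ % 26 ∈ [0, 26)
def convert_alphabet_number_to_lower_case_letter (number : Int) : Char :=
  Char.ofNat (96 + number + 1).toNat

def shift_character (c : Char) (shift : Int) : Char :=
  let original_alphabet_number := convert_lower_case_letter_to_alphabet_number c
  let shifted_alphabet_number := PySem.Int.mod (original_alphabet_number + shift) 26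
  convert_alphabet_number_to_lower_case_letter shifted_alphabet_number

def decrypt_room_name (room_name : String) (sector_id : Int) : String :=
  let words := PySem.Chars.splitOn room_name.toList ['-']
  let new_words := words.foldl (fun acc word =>
    acc ++ [word.foldl (fun new_word letter => new_word ++ [shift_character letter sector_id]) []]) []
  String.mk (PySem.Chars.join [' '] new_words)

-- ===== PORT B =====
def decrypt_room_name_alt (room_name : String) (sector_id : Int) : String :=
  let s := PySem.Int.mod sector_id 26
  String.mk (room_name.toList.map (fun c =>
    if c = '-' then ' '
    else Char.ofNat (97 + PySem.Int.mod ((c.toNat : Int) - 97 + s) 26).toNat))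

-- ===== PRECONDITION & SPEC =====
def Spec_decrypt_room_name (room_name : String) (sector_id : Int) (out : String) : Prop := out = decrypt_room_name_alt room_name sector_id
instance (room_name : String) (sector_id : Int) (out : String) : Decidable (Spec_decrypt_room_name room_name sector_id out) := by unfold Spec_decrypt_room_name; infer_instance

-- ===== CLAIM (what is proved, stated in full; the proofs are below) =====
def Claim_equal_decrypt_room_name : Prop := ∀ (room_name : String) (sector_id : Int), Dom_decrypt_room_name room_name sector_id → Spec_decrypt_room_name room_name sector_id (decrypt_room_name room_name sector_id)

-- ===== LEMMAS AND PROOFS =====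

-- reference single-char split, structural recursion (proof helper only)
def pvSplitAux (l : List Char) (cur : List Char) : List (List Char) :=
  match l with
  | [] => [cur.reverse]
  | c :: rest => if c = '-' then cur.reverse :: pvSplitAux rest [] else pvSplitAux rest (c :: cur)

theorem pvSplitAux_ne_nil : ∀ (l cur : List Char), pvSplitAux l cur ≠ [] := by
  intro l
  induction l with
  | nil => intro cur; simp [pvSplitAux]
  | cons c rest ih =>
    intro cur
    by_cases hc : c = '-'
    · simp [pvSplitAux, hc]
    · simpa [pvSplitAux, hc] using ih (c :: cur)

theorem pvGo_eq : ∀ (fuel : Nat) (l cur : List Char) (acc : List (List Char)), l.length < fuel →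
    PySem.Chars.splitOn.go ['-'] fuel l cur acc = acc.reverse ++ pvSplitAux l cur := by
  intro fuel
  induction fuel with
  | zero => intro l cur acc h; omega
  | succ n ih =>
    intro l cur acc h
    cases l with
    | nil => simp [PySem.Chars.splitOn.go, pvSplitAux]
    | cons c rest =>
      rw [PySem.Chars.splitOn.go]
      by_cases hc : c = '-'
      · subst hc
        simp only [List.isPrefixOf, Bool.and_true, beq_self_eq_true, if_pos, List.length_cons] at *
        rw [ih _ _ _ (by simp; omega)]
        simp [pvSplitAux]
      · have hp : (['-'].isPrefixOf (c :: rest)) = false := by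
          simp [List.isPrefixOf]; exact fun h' => absurd h'.symm hc
        rw [hp]
        simp only [Bool.false_eq_true, if_false]
        rw [ih _ _ _ (by simp at h ⊢; omega)]
        simp [pvSplitAux, hc]

theorem pvJoin_splitAux (f : Char → Char) : ∀ (l cur : List Char),
    PySem.Chars.join [' '] ((pvSplitAux l cur).map (List.map f)) =
      cur.reverse.map f ++ l.map (fun c => if c = '-' then ' ' else f c) := by
  intro l
  induction l with
  | nil => intro cur; simp [pvSplitAux, PySem.Chars.join_singleton]
  | cons c rest ih =>
    intro cur
    by_cases hc : c = '-'
    · subst hc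
      obtain ⟨w, t, hw⟩ := List.exists_cons_of_ne_nil (pvSplitAux_ne_nil rest [])
      have ihr := ih []
      rw [hw, List.map_cons] at ihr
      simp only [pvSplitAux, if_true]
      rw [hw]
      simp only [List.map_cons, if_true]
      rw [PySem.Chars.join_cons_cons, ihr]
      simp
    · simp only [pvSplitAux, if_neg hc, List.map_cons]
      rw [ih]
      simp

theorem pvShift_eq (sector_id : Int) (c : Char) :
    shift_character c sector_id =
      Char.ofNat (97 + PySem.Int.mod ((c.toNat : Int) - 97 + PySem.Int.mod sector_id 26) 26).toNat := by
  have h1 : PySem.Int.mod ((c.toNat : Int) - 97 + sector_id) 26 = ((c.toNat : Int) - 97 + sector_id) % 26 :=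
    PySem.Int.mod_eq_emod_of_pos (by norm_num)
  have h2 : PySem.Int.mod sector_id 26 = sector_id % 26 :=
    PySem.Int.mod_eq_emod_of_pos (by norm_num)
  have h3 : PySem.Int.mod ((c.toNat : Int) - 97 + sector_id % 26) 26 = ((c.toNat : Int) - 97 + sector_id % 26) % 26 :=
    PySem.Int.mod_eq_emod_of_pos (by norm_num)
  simp only [shift_character, convert_lower_case_letter_to_alphabet_number,
    convert_alphabet_number_to_lower_case_letter, h1, h2, h3]
  congr 1
  omega

-- ===== VERDICT (by name: the statement is the Claim_ definition above) =====
theorem decrypt_room_name_spec : Claim_equal_decrypt_room_name := by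
  intro room_name sector_id _
  unfold Spec_decrypt_room_name decrypt_room_name decrypt_room_name_alt PySem.Chars.splitOn
  simp only [PySem.List.foldl_append_singleton_eq_map, List.nil_append]
  rw [pvGo_eq _ _ _ _ (by omega)]
  simp only [List.reverse_nil, List.nil_append]
  rw [pvJoin_splitAux (fun c => shift_character c sector_id) room_name.toList []]
  simp only [List.reverse_nil, List.map_nil, List.nil_append]
  congr 1
  apply List.map_congr_left
  intro c _
  by_cases hc : c = '-'
  · simp [hc]
  · simp only [if_neg hc, pvShift_eq]
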